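-- pv_equiv track=rewrite | github.com/fescofesco/CCC | CCC/Challenge 2024/level5/input_parse.py | has_adjacent_desk
-- ===== SOURCE A (Python) =====
-- def has_adjacent_desk(matrix, x, y, desk_cells):
--     """Check if any adjacent cells (including diagonals) have a desk."""
--     for ci, cj in desk_cells:
--         for ni in range(ci - 1, ci + 2):
--             for nj in range(cj - 1, cj + 2):
--                 if (ni, nj) in desk_cells:
--                     continue
--                 if 0 <= ni < y and 0 <= nj < x:
--                     if matrix[ni][nj] == 'X':
--                         return True
--     return False
-- ===== SOURCE B (Python) =====
-- def has_adjacent_desk(matrix, x, y, desk_cells):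
--     """Check if any adjacent cells (including diagonals) have a desk."""
--     desk_set = set(desk_cells)
--     for ni, row in enumerate(matrix):
--         if ni >= y:
--             break
--         for nj, cell in enumerate(row):
--             if nj >= x:
--                 break
--             if cell == 'X' and (ni, nj) not in desk_set:
--                 for di, dj in ((-1, -1), (-1, 0), (-1, 1), (0, -1), (0, 1), (1, -1), (1, 0), (1, 1)):
--                     if (ni + di, nj + dj) in desk_set:
--                         return True
--     return False
-- ===== Notes on version B (the rewrite author's own statement) =====
-- stated objective: alternative
-- what changed: Inverts the traversal: instead of scanning each desk cell's 3x3 neighborhood with repeated list membership tests, B walks the matrix rows once (bounded by y and x) and, for each 'X' cell not on a desk, checks its 8 neighbors against a desk set built once.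
-- outside the precondition, e.g. on has_adjacent_desk([['.', 'X']], 2, 2, {(0, 0)}): A returns True, B returns True
import Mathlib
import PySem

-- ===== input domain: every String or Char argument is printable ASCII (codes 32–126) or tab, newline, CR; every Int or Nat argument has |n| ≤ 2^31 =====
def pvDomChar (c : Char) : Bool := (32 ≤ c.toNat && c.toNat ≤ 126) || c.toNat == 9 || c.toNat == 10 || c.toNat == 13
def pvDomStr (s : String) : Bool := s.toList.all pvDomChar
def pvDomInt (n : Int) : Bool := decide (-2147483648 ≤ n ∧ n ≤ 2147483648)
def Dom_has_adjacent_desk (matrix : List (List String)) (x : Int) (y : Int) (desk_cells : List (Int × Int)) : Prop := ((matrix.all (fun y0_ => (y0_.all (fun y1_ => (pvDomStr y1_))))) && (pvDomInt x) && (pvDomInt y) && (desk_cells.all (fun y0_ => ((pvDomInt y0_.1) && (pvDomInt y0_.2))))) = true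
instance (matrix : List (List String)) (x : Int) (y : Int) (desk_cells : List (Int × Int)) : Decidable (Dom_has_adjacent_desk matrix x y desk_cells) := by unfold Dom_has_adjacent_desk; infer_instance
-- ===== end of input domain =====

-- B inverts the traversal: one walk over the matrix rows (bounded by y and x), testing each
-- non-desk 'X' cell's 8 neighbors against a desk set built once (alternative decomposition).

-- ===== PORT A =====
def has_adjacent_desk (matrix : List (List String)) (x : Int) (y : Int) (desk_cells : List (Int × Int)) : Bool :=
  desk_cells.any (fun c =>
    (PySem.List.pyRange (c.1 - 1) (c.1 + 2) 1).any (fun ni =>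
      (PySem.List.pyRange (c.2 - 1) (c.2 + 2) 1).any (fun nj =>
        if desk_cells.contains (ni, nj) then false
        else if 0 ≤ ni ∧ ni < y ∧ 0 ≤ nj ∧ nj < x then
          -- matrix[ni][nj]: in bounds under Pre_has_adjacent_desk, so pyGetD is exact
          PySem.List.pyGetD (PySem.List.pyGetD matrix ni []) nj "" == "X"
        else false)))

-- ===== PORT B =====
def pvDeltas : List (Int × Int) :=
  [(-1, -1), (-1, 0), (-1, 1), (0, -1), (0, 1), (1, -1), (1, 0), (1, 1)]

-- Python's `break` on an increasing enumerate index is modelled by the guard returning false: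
-- every later index also fails the guard, so the `any` result is identical.
def has_adjacent_desk_alt (matrix : List (List String)) (x : Int) (y : Int) (desk_cells : List (Int × Int)) : Bool :=
  let desk_set : PySem.Set (Int × Int) := PySem.Set.ofList desk_cells
  (PySem.List.enumerate matrix 0).any (fun p =>
    if y ≤ p.1 then false
    else (PySem.List.enumerate p.2 0).any (fun q =>
      if x ≤ q.1 then false
      else if q.2 == "X" && !(PySem.Set.contains desk_set (p.1, q.1)) then
        pvDeltas.any (fun d => PySem.Set.contains desk_set (p.1 + d.1, q.1 + d.2))
      else false))

-- ===== PRECONDITION & SPEC =====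
-- Pre_ requires every in-bounds (0 ≤ ni < y, 0 ≤ nj < x), non-desk neighbor cell of a desk
-- cell to exist in the matrix: outside it A's desk-driven scan raises IndexError unless an
-- earlier desk cell already produced True, while B only walks cells the matrix actually has.
def Pre_has_adjacent_desk (matrix : List (List String)) (x : Int) (y : Int) (desk_cells : List (Int × Int)) : Prop :=
  ∀ c ∈ desk_cells, ∀ ni ∈ PySem.List.pyRange (c.1 - 1) (c.1 + 2) 1,
    ∀ nj ∈ PySem.List.pyRange (c.2 - 1) (c.2 + 2) 1,
      (ni, nj) ∉ desk_cells → 0 ≤ ni → ni < y → 0 ≤ nj → nj < x →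
        ni.toNat < matrix.length ∧ nj.toNat < (matrix.getD ni.toNat []).length
instance (matrix : List (List String)) (x : Int) (y : Int) (desk_cells : List (Int × Int)) : Decidable (Pre_has_adjacent_desk matrix x y desk_cells) := by unfold Pre_has_adjacent_desk; infer_instance

def pvWitness_has_adjacent_desk : List (List String) × Int × Int × (List (Int × Int)) :=
  ([["X", "."], [".", "."]], 2, 2, [(1, 1)])

def Spec_has_adjacent_desk (matrix : List (List String)) (x : Int) (y : Int) (desk_cells : List (Int × Int)) (out : Bool) : Prop := out = has_adjacent_desk_alt matrix x y desk_cells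
instance (matrix : List (List String)) (x : Int) (y : Int) (desk_cells : List (Int × Int)) (out : Bool) : Decidable (Spec_has_adjacent_desk matrix x y desk_cells out) := by unfold Spec_has_adjacent_desk; infer_instance

-- ===== CLAIM (what is proved, stated in full; the proofs are below) =====
def Claim_equal_has_adjacent_desk : Prop := ∀ (matrix : List (List String)) (x : Int) (y : Int) (desk_cells : List (Int × Int)), Dom_has_adjacent_desk matrix x y desk_cells → Pre_has_adjacent_desk matrix x y desk_cells → Spec_has_adjacent_desk matrix x y desk_cells (has_adjacent_desk matrix x y desk_cells)

-- ===== LEMMAS AND PROOFS =====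

-- the cell read both ports perform
def pvCell (matrix : List (List String)) (ni nj : Int) : String :=
  PySem.List.pyGetD (PySem.List.pyGetD matrix ni []) nj ""

-- the shared "hit" predicate both ports decide
def pvHit (matrix : List (List String)) (x y : Int) (desk_cells : List (Int × Int)) : Prop :=
  ∃ c ∈ desk_cells, ∃ ni nj : Int,
    c.1 - 1 ≤ ni ∧ ni < c.1 + 2 ∧ c.2 - 1 ≤ nj ∧ nj < c.2 + 2 ∧
    (ni, nj) ∉ desk_cells ∧ 0 ≤ ni ∧ ni < y ∧ 0 ≤ nj ∧ nj < x ∧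
    pvCell matrix ni nj = "X"

theorem portA_iff (matrix : List (List String)) (x y : Int) (desk_cells : List (Int × Int)) :
    has_adjacent_desk matrix x y desk_cells = true ↔ pvHit matrix x y desk_cells := by
  unfold has_adjacent_desk pvHit pvCell
  simp
  tauto

theorem portB_iff (matrix : List (List String)) (x y : Int) (desk_cells : List (Int × Int))
    (hpre : Pre_has_adjacent_desk matrix x y desk_cells) :
    has_adjacent_desk_alt matrix x y desk_cells = true ↔ pvHit matrix x y desk_cells := by
  unfold has_adjacent_desk_alt pvHit pvCell
  simp [pvDeltas, PySem.Set.mem_ofList, PySem.List.mem_enumerate_iff]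
  constructor
  · rintro ⟨k, hky, hk, l, hlx, ⟨⟨hl, hX⟩, hnot⟩, hd⟩
    have hcell : PySem.List.pyGetD (PySem.List.pyGetD matrix (k : Int) []) (l : Int) "" = matrix[k][l] := by
      simp [hk, hl]
    have hX' : PySem.List.pyGetD (PySem.List.pyGetD matrix (k : Int) []) (l : Int) "" = "X" := by
      rw [hcell]; exact hX
    rcases hd with h | h | h | h | h | h | h | h
    · exact ⟨(k : Int) + -1, (l : Int) + -1, h, k, by omega, by omega, l, by omega, by omega, hnot, by omega, hky, by omega, hlx, hX'⟩
    · exact ⟨(k : Int) + -1, (l : Int), h, k, by omega, by omega, l, by omega, by omega, hnot, by omega, hky, by omega, hlx, hX'⟩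
    · exact ⟨(k : Int) + -1, (l : Int) + 1, h, k, by omega, by omega, l, by omega, by omega, hnot, by omega, hky, by omega, hlx, hX'⟩
    · exact ⟨(k : Int), (l : Int) + -1, h, k, by omega, by omega, l, by omega, by omega, hnot, by omega, hky, by omega, hlx, hX'⟩
    · exact ⟨(k : Int), (l : Int) + 1, h, k, by omega, by omega, l, by omega, by omega, hnot, by omega, hky, by omega, hlx, hX'⟩
    · exact ⟨(k : Int) + 1, (l : Int) + -1, h, k, by omega, by omega, l, by omega, by omega, hnot, by omega, hky, by omega, hlx, hX'⟩
    · exact ⟨(k : Int) + 1, (l : Int), h, k, by omega, by omega, l, by omega, by omega, hnot, by omega, hky, by omega, hlx, hX'⟩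
    · exact ⟨(k : Int) + 1, (l : Int) + 1, h, k, by omega, by omega, l, by omega, by omega, hnot, by omega, hky, by omega, hlx, hX'⟩
  · rintro ⟨a, b, hm, ni, h1, h2, nj, h3, h4, hnot, h5, h6, h7, h8, hX⟩
    obtain ⟨hk, hl⟩ := hpre (a, b) hm ni (PySem.List.mem_pyRange_one.mpr ⟨by omega, by omega⟩)
      nj (PySem.List.mem_pyRange_one.mpr ⟨by omega, by omega⟩) hnot h5 h6 h7 h8
    have eni : (ni.toNat : Int) = ni := Int.toNat_of_nonneg h5
    have enj : (nj.toNat : Int) = nj := Int.toNat_of_nonneg h7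
    have hrow : matrix.getD ni.toNat [] = matrix[ni.toNat] := List.getD_eq_getElem matrix [] hk
    have hl' : nj.toNat < matrix[ni.toNat].length := hrow ▸ hl
    have e1 : PySem.List.pyGetD matrix ni [] = matrix[ni.toNat] :=
      PySem.List.pyGetD_eq_getElem matrix [] h5 (by omega)
    have e2 : PySem.List.pyGetD (matrix[ni.toNat]) nj "" = matrix[ni.toNat][nj.toNat] :=
      PySem.List.pyGetD_eq_getElem (matrix[ni.toNat]) "" h7 (by omega)
    have hX' : matrix[ni.toNat][nj.toNat] = "X" := by rw [e1, e2] at hX; exact hX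
    refine ⟨ni.toNat, by omega, hk, nj.toNat, by omega, ⟨⟨hl', hX'⟩, by rw [eni, enj]; exact hnot⟩, ?_⟩
    have ha : a = ni + -1 ∨ a = ni ∨ a = ni + 1 := by omega
    have hb : b = nj + -1 ∨ b = nj ∨ b = nj + 1 := by omega
    rw [eni, enj]
    rcases ha with ha | ha | ha <;> rcases hb with hb | hb | hb <;>
      subst ha <;> subst hb <;> tauto

-- ===== VERDICT (by name: the statement is the Claim_ definition above) =====
theorem has_adjacent_desk_spec : Claim_equal_has_adjacent_desk := by
  intro matrix x y desk_cells _ hpre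
  unfold Spec_has_adjacent_desk
  exact Bool.eq_iff_iff.mpr ((portA_iff ..).trans (portB_iff matrix x y desk_cells hpre).symm)
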